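-- pv_equiv track=rewrite | github.com/eliza-01/qr_preset_studio | tools/list/main.py | _split_patterns
-- ===== SOURCE A (Python) =====
-- from typing import List
--
-- def _split_patterns(extra: List[str]) -> List[str]:
--     out: List[str] = []
--     for s in extra:
--         for token in s.split(";"):
--             t = token.strip()
--             if t:
--                 out.append(t)
--     return out
-- ===== SOURCE B (Python) =====
-- from typing import List
--
-- def _split_patterns(extra: List[str]) -> List[str]:
--     # Character-level scanner: one pass over the characters with a token buffer
--     # and a pending-whitespace run; no split()/strip() calls at all.
--     out: List[str] = []
--     buf: List[str] = []   # current token so far, already left-stripped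
--     pend: List[str] = []  # whitespace seen after the last non-space char
--     for s in extra:
--         for ch in s:
--             if ch == ";":
--                 if buf:
--                     out.append("".join(buf))
--                 buf = []
--                 pend = []
--             elif ch.isspace():
--                 if buf:
--                     pend.append(ch)
--             else:
--                 buf.extend(pend)
--                 pend = []
--                 buf.append(ch)
--         if buf:
--             out.append("".join(buf))
--         buf = []
--         pend = []
--     return out
-- ===== Notes on version B (the rewrite author's own statement) =====
-- stated objective: alternative
-- what changed: B replaces A's nested split()/strip() passes with a single character-level state machine (token buffer plus pending-whitespace run) that emits a token on ';' or end of string, never calling split or strip.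
import Mathlib
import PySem

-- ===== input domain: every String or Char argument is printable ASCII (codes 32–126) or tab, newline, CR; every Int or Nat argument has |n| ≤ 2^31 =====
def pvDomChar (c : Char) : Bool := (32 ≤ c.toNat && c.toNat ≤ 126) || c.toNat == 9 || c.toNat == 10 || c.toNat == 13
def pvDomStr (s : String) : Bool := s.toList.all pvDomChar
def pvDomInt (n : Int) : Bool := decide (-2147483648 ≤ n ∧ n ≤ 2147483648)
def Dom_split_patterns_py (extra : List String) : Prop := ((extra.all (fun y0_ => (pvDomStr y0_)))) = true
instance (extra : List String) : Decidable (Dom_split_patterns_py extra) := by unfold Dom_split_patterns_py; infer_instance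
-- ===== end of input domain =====

-- B replaces A's nested split()/strip() passes with a single character-level state
-- machine (token buffer + pending-whitespace run); alternative algorithm, same cost.

-- ===== PORT A =====
def split_patterns_py (extra : List String) : List String :=
  extra.foldl (fun out s =>
    (PySem.Chars.splitOn s.toList [';']).foldl (fun out token =>
      let t := PySem.Chars.strip token
      if t.isEmpty then out else out ++ [String.ofList t]) out) []

-- ===== PORT B =====
-- `if buf: out.append("".join(buf))`
def pvFlush (out : List String) (buf : List Char) : List String :=
  if buf.isEmpty then out else out ++ [String.ofList buf]

-- the inner per-character step of Source B's scanner; state = (out, buf, pend)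
def pvStep (st : List String × List Char × List Char) (ch : Char) :
    List String × List Char × List Char :=
  if ch = ';' then (pvFlush st.1 st.2.1, [], [])
  else if PySem.Chars.isspace ch then
    (st.1, st.2.1, if st.2.1.isEmpty then st.2.2 else st.2.2 ++ [ch])
  else (st.1, st.2.1 ++ st.2.2 ++ [ch], [])

def split_patterns_py_alt (extra : List String) : List String :=
  (extra.foldl (fun st s =>
      let st' := s.toList.foldl pvStep st
      (pvFlush st'.1 st'.2.1, [], []))
    ([], [], [])).1

-- ===== PRECONDITION & SPEC =====
def Spec_split_patterns_py (extra : List String) (out : List String) : Prop := out = split_patterns_py_alt extra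
instance (extra : List String) (out : List String) : Decidable (Spec_split_patterns_py extra out) := by unfold Spec_split_patterns_py; infer_instance

-- ===== CLAIM (what is proved, stated in full; the proofs are below) =====
def Claim_equal_split_patterns_py : Prop := ∀ (extra : List String), Dom_split_patterns_py extra → Spec_split_patterns_py extra (split_patterns_py extra)

-- ===== LEMMAS AND PROOFS =====

-- Simple structural splitter on ';' (proof-only characterisation of PySem.Chars.splitOn · [';']).
def splitc : List Char → List (List Char)
  | [] => [[]]
  | c :: r => if c = ';' then [] :: splitc r else (splitc r).modifyHead (c :: ·)

theorem splitc_ne_nil (l : List Char) : splitc l ≠ [] := by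
  induction l with
  | nil => simp [splitc]
  | cons c r ih =>
    simp only [splitc]
    split_ifs
    · simp
    · cases h : splitc r with
      | nil => exact absurd h ih
      | cons a t => simp

theorem go_eq_splitc (fuel : Nat) (l cur : List Char) (acc : List (List Char))
    (h : l.length < fuel) :
    PySem.Chars.splitOn.go [';'] fuel l cur acc
      = acc.reverse ++ (splitc l).modifyHead (cur.reverse ++ ·) := by
  induction fuel generalizing l cur acc with
  | zero => omega
  | succ f ih =>
    cases l with
    | nil => simp [PySem.Chars.splitOn.go, splitc]
    | cons c rest =>
      simp only [PySem.Chars.splitOn.go]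
      by_cases hc : c = ';'
      · subst hc
        have hpre : [';'].isPrefixOf (';' :: rest) = true := by simp [List.isPrefixOf]
        rw [if_pos hpre]
        have := ih rest [] (cur.reverse :: acc) (by simpa using Nat.lt_of_succ_lt_succ h)
        simp only [List.length_singleton, List.drop_succ_cons, List.drop_zero]
        rw [this]
        simp only [splitc, if_true]
        cases splitc rest <;> simp
      · have hpre : [';'].isPrefixOf (c :: rest) = false := by
          simp [List.isPrefixOf]; exact fun h => hc h.symm
        rw [if_neg (by simp [hpre])]
        have := ih rest (c :: cur) acc (by simpa using Nat.lt_of_succ_lt_succ h)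
        rw [this]
        simp only [splitc, if_neg hc]
        cases h2 : splitc rest with
        | nil => exact absurd h2 (splitc_ne_nil rest)
        | cons a t => simp

theorem splitOn_eq_splitc (s : List Char) :
    PySem.Chars.splitOn s [';'] = splitc s := by
  unfold PySem.Chars.splitOn
  rw [go_eq_splitc _ _ _ _ (by omega)]
  cases h : splitc s with
  | nil => exact absurd h (splitc_ne_nil s)
  | cons a t => simp

-- Per-string processing: strip every token of splitc and keep the nonempty ones.
def procTokens (ts : List (List Char)) : List String :=
  ((ts.map PySem.Chars.strip).filter (fun t => !t.isEmpty)).map String.ofList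

theorem inner_foldl_eq (ts : List (List Char)) (acc : List String) :
    ts.foldl (fun out token =>
      let t := PySem.Chars.strip token
      if t.isEmpty then out else out ++ [String.ofList t]) acc
    = acc ++ procTokens ts := by
  induction ts generalizing acc with
  | nil => simp [procTokens]
  | cons x r ih =>
    simp only [List.foldl_cons, procTokens, List.map_cons, List.filter_cons]
    by_cases hx : (PySem.Chars.strip x).isEmpty
    · simp only [hx, if_true, ih, procTokens]
      simp
    · simp only [hx, ih, procTokens]
      simp

theorem portA_eq_flatMap (extra : List String) :
    split_patterns_py extra
      = extra.flatMap (fun s => procTokens (splitc s.toList)) := by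
  unfold split_patterns_py
  have : ∀ (acc : List String),
      extra.foldl (fun out s =>
        (PySem.Chars.splitOn s.toList [';']).foldl (fun out token =>
          let t := PySem.Chars.strip token
          if t.isEmpty then out else out ++ [String.ofList t]) out) acc
      = acc ++ extra.flatMap (fun s => procTokens (splitc s.toList)) := by
    intro acc
    induction extra generalizing acc with
    | nil => simp
    | cons s r ih =>
      simp only [List.foldl_cons, List.flatMap_cons]
      rw [splitOn_eq_splitc, inner_foldl_eq, ih]
      simp
  simpa using this []

-- ---- B-side proofs: the scanner computes procTokens ∘ splitc per string ----

theorem procTokens_cons (t : List Char) (ts : List (List Char)) :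
    procTokens (t :: ts)
      = (if (PySem.Chars.strip t).isEmpty then []
         else [String.ofList (PySem.Chars.strip t)]) ++ procTokens ts := by
  simp only [procTokens, List.map_cons, List.filter_cons]
  by_cases h : (PySem.Chars.strip t).isEmpty <;> simp [h]

theorem strip_cons_space (c : Char) (t : List Char) (hc : PySem.Chars.isspace c = true) :
    PySem.Chars.strip (c :: t) = PySem.Chars.strip t := by
  simp [PySem.Chars.strip, PySem.Chars.lstrip, hc]

theorem strip_fixed (buf pend : List Char)
    (h1 : PySem.Chars.lstrip buf = buf) (h2 : PySem.Chars.rstrip buf = buf)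
    (h3 : ∀ c ∈ pend, PySem.Chars.isspace c = true) (h4 : buf = [] → pend = []) :
    PySem.Chars.strip (buf ++ pend) = buf := by
  cases hb : buf with
  | nil => simp [h4 hb, PySem.Chars.strip, PySem.Chars.lstrip, PySem.Chars.rstrip]
  | cons b bs =>
    have hbns : PySem.Chars.isspace b = false := by
      by_contra h
      have : PySem.Chars.isspace b = true := by
        cases hx : PySem.Chars.isspace b
        · exact absurd hx h
        · rfl
      have := h1
      rw [hb] at this
      simp [PySem.Chars.lstrip, ‹PySem.Chars.isspace b = true›] at this
      have := congrArg List.length this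
      simp at this
      have := List.length_dropWhile_le (p := PySem.Chars.isspace) bs
      omega
    rw [← hb]
    unfold PySem.Chars.strip
    have hl : PySem.Chars.lstrip (buf ++ pend) = buf ++ pend := by
      rw [hb]
      simp [PySem.Chars.lstrip, hbns]
    rw [hl]
    -- rstrip (buf ++ pend) = rstrip buf = buf
    unfold PySem.Chars.rstrip
    rw [List.reverse_append, List.dropWhile_append]
    have hall : pend.reverse.dropWhile PySem.Chars.isspace = [] := by
      rw [List.dropWhile_eq_nil_iff]
      intro c hc
      exact h3 c (List.mem_reverse.mp hc)
    rw [hall]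
    simp only [List.isEmpty_nil, if_true]
    have := h2
    unfold PySem.Chars.rstrip at this
    exact this

theorem scan_spec (l : List Char) :
    ∀ (out : List String) (buf pend : List Char),
      PySem.Chars.lstrip buf = buf → PySem.Chars.rstrip buf = buf →
      (∀ c ∈ pend, PySem.Chars.isspace c = true) → (buf = [] → pend = []) →
      (let st := l.foldl pvStep (out, buf, pend)
       pvFlush st.1 st.2.1)
        = out ++ procTokens ((splitc l).modifyHead (fun t => buf ++ pend ++ t)) := by
  induction l with
  | nil =>
    intro out buf pend h1 h2 h3 h4
    simp only [List.foldl_nil, splitc, List.modifyHead, List.append_nil]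
    rw [procTokens_cons]
    have hs := strip_fixed buf pend h1 h2 h3 h4
    simp only [procTokens, List.map_nil, List.filter_nil, List.append_nil, hs, pvFlush]
    by_cases hb : buf.isEmpty <;> simp [hb]
  | cons c r ih =>
    intro out buf pend h1 h2 h3 h4
    by_cases hc : c = ';'
    · subst hc
      simp only [List.foldl_cons, pvStep, reduceIte, splitc]
      rw [ih (pvFlush out buf) [] [] (by rfl) (by rfl) (by simp) (fun _ => rfl)]
      have hmod : (splitc r).modifyHead (fun t => ([] : List Char) ++ [] ++ t)
          = (splitc r).modifyHead (fun t => t) := by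
        cases splitc r <;> simp
      rw [hmod]
      have hid : (splitc r).modifyHead (fun t => t) = splitc r := by
        cases splitc r <;> simp
      rw [hid]
      have hmod2 : ((([]:List Char) :: splitc r).modifyHead (fun t => buf ++ pend ++ t))
          = (buf ++ pend) :: splitc r := by simp
      rw [hmod2, procTokens_cons]
      have hs := strip_fixed buf pend h1 h2 h3 h4
      rw [hs]
      simp only [pvFlush]
      by_cases hb : buf.isEmpty <;> simp [hb]
    · by_cases hsp : PySem.Chars.isspace c = true
      · simp only [List.foldl_cons, pvStep, if_neg hc, hsp, if_true]
        by_cases hb : buf.isEmpty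
        · have hbuf : buf = [] := by simpa [List.isEmpty_iff] using hb
          have hpend : pend = [] := h4 hbuf
          simp only [hb, if_true]
          rw [ih out buf pend h1 h2 h3 h4]
          congr 1
          subst hbuf hpend
          simp only [splitc, if_neg hc, List.nil_append]
          cases h' : splitc r with
          | nil => exact absurd h' (splitc_ne_nil r)
          | cons a t =>
            simp only [List.modifyHead]
            rw [procTokens_cons, procTokens_cons, strip_cons_space c a hsp]
        · have hbne : ¬ buf = [] := by simpa [List.isEmpty_iff] using hb
          have hb' : buf.isEmpty = false := by simpa using hb
          simp only [hb', Bool.false_eq_true, if_false]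
          rw [ih out buf (pend ++ [c]) h1 h2
              (by intro x hx; rcases List.mem_append.mp hx with h | h
                  · exact h3 x h
                  · simp at h; subst h; exact hsp)
              (fun h => absurd h hbne)]
          congr 1
          simp only [splitc, if_neg hc]
          cases h' : splitc r with
          | nil => exact absurd h' (splitc_ne_nil r)
          | cons a t => simp
      · have hspf : PySem.Chars.isspace c = false := by
          cases hx : PySem.Chars.isspace c
          · rfl
          · exact absurd hx hsp
        simp only [List.foldl_cons, pvStep, if_neg hc, hspf, Bool.false_eq_true, if_false]
        have hnew1 : PySem.Chars.lstrip (buf ++ pend ++ [c]) = buf ++ pend ++ [c] := by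
          cases hbb : buf with
          | nil =>
            rw [h4 hbb]
            simp [PySem.Chars.lstrip, hspf]
          | cons b bs =>
            have : PySem.Chars.lstrip (b :: bs) = b :: bs := by rw [← hbb]; exact h1
            have hbns : PySem.Chars.isspace b = false := by
              by_contra hx
              have hxt : PySem.Chars.isspace b = true := by
                cases hy : PySem.Chars.isspace b
                · exact absurd hy hx
                · rfl
              simp [PySem.Chars.lstrip, hxt] at this
              have := congrArg List.length this
              simp at this
              have := List.length_dropWhile_le (p := PySem.Chars.isspace) bs
              omega
            simp [PySem.Chars.lstrip, hbns]
        have hnew2 : PySem.Chars.rstrip (buf ++ pend ++ [c]) = buf ++ pend ++ [c] := by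
          unfold PySem.Chars.rstrip
          rw [List.reverse_append]
          simp [hspf]
        rw [ih out (buf ++ pend ++ [c]) [] hnew1 hnew2 (by simp) (by simp)]
        congr 1
        simp only [splitc, if_neg hc]
        cases h' : splitc r with
        | nil => exact absurd h' (splitc_ne_nil r)
        | cons a t => simp

theorem portB_eq_flatMap (extra : List String) :
    split_patterns_py_alt extra
      = extra.flatMap (fun s => procTokens (splitc s.toList)) := by
  unfold split_patterns_py_alt
  have main : ∀ (out : List String),
      (extra.foldl (fun st s =>
          let st' := s.toList.foldl pvStep st
          (pvFlush st'.1 st'.2.1, ([] : List Char), ([] : List Char)))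
        (out, [], []))
      = (out ++ extra.flatMap (fun s => procTokens (splitc s.toList)), [], []) := by
    intro out
    induction extra generalizing out with
    | nil => simp
    | cons s r ih =>
      simp only [List.foldl_cons, List.flatMap_cons]
      have hone := scan_spec s.toList out [] [] rfl rfl (by simp) (fun _ => rfl)
      simp only at hone
      have hmod : (splitc s.toList).modifyHead (fun t => ([]:List Char) ++ [] ++ t)
          = splitc s.toList := by
        cases splitc s.toList <;> simp
      rw [hmod] at hone
      rw [hone, ih]
      simp
  rw [main []]
  simp

-- ===== VERDICT (by name: the statement is the Claim_ definition above) =====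
theorem split_patterns_py_spec : Claim_equal_split_patterns_py := by
  intro extra _
  unfold Spec_split_patterns_py
  rw [portA_eq_flatMap, portB_eq_flatMap]
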